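-- pv_equiv track=rewrite | github.com/nikoinikoi636-ux/syntra-core-public | external_user_drop/user_home_zip/sofia_package/plugins/optimizer.py | _solve_conflicts
-- ===== SOURCE A (Python) =====
-- def _solve_conflicts(enable, disable, conflicts):
--     active = set(enable)
--     banned = set(disable)
--     changed = True
--     while changed:
--         changed = False
--         for mod in list(active):
--             for c in conflicts.get(mod, []):
--                 if c in active:
--                     active.remove(c); banned.add(c); changed = True
--         for mod in list(banned):
--             for c in conflicts.get(mod, []):
--                 pass
--     return sorted(active), sorted(banned)
-- ===== SOURCE B (Python) =====
-- def _solve_conflicts(enable, disable, conflicts):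
--     active = set(enable)
--     banned = set(disable)
--     # one pass suffices: conflict targets computed against the ORIGINAL active set
--     targets = {c for mod in active for c in conflicts.get(mod, []) if c in active}
--     return sorted(active - targets), sorted(banned | targets)
-- ===== Notes on version B (the rewrite author's own statement) =====
-- stated objective: simpler
-- what changed: Replaces the fixed-point while-loop with in-place set mutation (and its dead banned-scanning loop) by a single set comprehension computing all conflict targets against the original active set, then one set difference and one union; the loop-until-no-change and re-scanning disappear.
import Mathlib
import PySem

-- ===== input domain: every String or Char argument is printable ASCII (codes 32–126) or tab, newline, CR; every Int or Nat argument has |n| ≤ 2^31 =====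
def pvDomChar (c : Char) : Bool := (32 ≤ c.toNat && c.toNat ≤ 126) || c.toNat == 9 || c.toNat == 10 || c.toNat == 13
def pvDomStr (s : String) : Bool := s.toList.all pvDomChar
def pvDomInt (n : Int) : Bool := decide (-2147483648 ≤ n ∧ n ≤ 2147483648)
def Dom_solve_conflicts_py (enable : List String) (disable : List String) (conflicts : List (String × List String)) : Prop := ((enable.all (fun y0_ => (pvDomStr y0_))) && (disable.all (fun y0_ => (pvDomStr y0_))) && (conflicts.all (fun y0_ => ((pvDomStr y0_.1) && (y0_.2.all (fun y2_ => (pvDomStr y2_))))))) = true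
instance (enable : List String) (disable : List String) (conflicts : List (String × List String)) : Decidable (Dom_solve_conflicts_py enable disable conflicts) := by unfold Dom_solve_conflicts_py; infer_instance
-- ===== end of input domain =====

-- B replaces A's fixed-point while-loop (with its dead banned-scanning pass) by a single
-- comprehension over the original active set plus one set difference and one union (simpler).

-- ===== PORT A =====
-- inner body: `if c in active: active.remove(c); banned.add(c); changed = True`
-- (under the guard `c in active`, Python's set.remove(c) = discard(c); no KeyError possible)
def aStep (st : PySem.Set String × PySem.Set String × Bool) (c : String) :
    PySem.Set String × PySem.Set String × Bool :=
  if PySem.Set.contains st.1 c then (PySem.Set.discard st.1 c, PySem.Set.add st.2.1 c, true)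
  else st

-- one body of the while loop: `changed = False; for mod in list(active): for c in conflicts.get(mod, []): …`
def aPass (cf : PySem.Dict String (List String)) (snap : List String)
    (st : PySem.Set String × PySem.Set String × Bool) :
    PySem.Set String × PySem.Set String × Bool :=
  snap.foldl (fun st m => (PySem.Dict.getD cf m []).foldl aStep st) st

-- the while loop; each changed pass strictly shrinks `active`, so fuel |enable| + 2 never runs out
-- (the second `for mod in list(banned): for c in …: pass` loop of A has no effect and is omitted)
def aLoop (cf : PySem.Dict String (List String)) :
    Nat → PySem.Set String → PySem.Set String → PySem.Set String × PySem.Set String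
  | 0, a, b => (a, b)
  | n + 1, a, b =>
    let st := aPass cf a (a, b, false)
    if st.2.2 then aLoop cf n st.1 st.2.1 else (st.1, st.2.1)

def solve_conflicts_py (enable : List String) (disable : List String)
    (conflicts : List (String × List String)) : List String × List String :=
  let cf := PySem.Dict.ofList conflicts
  let r := aLoop cf (enable.length + 2) (PySem.Set.ofList enable) (PySem.Set.ofList disable)
  (PySem.List.sorted r.1 (fun x => x) false, PySem.List.sorted r.2 (fun x => x) false)

-- ===== PORT B =====
-- one comprehension element test: `c for … if c in active` (against the ORIGINAL active set)
def bStep (active : PySem.Set String) (t : PySem.Set String) (c : String) : PySem.Set String :=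
  if PySem.Set.contains active c then PySem.Set.add t c else t

-- `targets = {c for mod in active for c in conflicts.get(mod, []) if c in active}`
def bTargets (cf : PySem.Dict String (List String)) (active : PySem.Set String) :
    PySem.Set String :=
  active.foldl (fun t m => (PySem.Dict.getD cf m []).foldl (bStep active) t) PySem.Set.empty

def solve_conflicts_py_alt (enable : List String) (disable : List String)
    (conflicts : List (String × List String)) : List String × List String :=
  let cf := PySem.Dict.ofList conflicts
  let active := PySem.Set.ofList enable
  let banned := PySem.Set.ofList disable
  let targets := bTargets cf active
  (PySem.List.sorted (PySem.Set.diff active targets) (fun x => x) false,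
   PySem.List.sorted (PySem.Set.union banned targets) (fun x => x) false)

-- ===== PRECONDITION & SPEC =====
def Spec_solve_conflicts_py (enable : List String) (disable : List String) (conflicts : List (String × List String)) (out : List String × List String) : Prop := out = solve_conflicts_py_alt enable disable conflicts
instance (enable : List String) (disable : List String) (conflicts : List (String × List String)) (out : List String × List String) : Decidable (Spec_solve_conflicts_py enable disable conflicts out) := by unfold Spec_solve_conflicts_py; infer_instance

-- ===== CLAIM (what is proved, stated in full; the proofs are below) =====
def Claim_equal_solve_conflicts_py : Prop := ∀ (enable : List String) (disable : List String) (conflicts : List (String × List String)), Dom_solve_conflicts_py enable disable conflicts → Spec_solve_conflicts_py enable disable conflicts (solve_conflicts_py enable disable conflicts)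

-- ===== LEMMAS AND PROOFS =====

lemma diff_nil (A : PySem.Set String) : PySem.Set.diff A [] = A := by
  simp [PySem.Set.diff]

lemma diff_snoc (A T : PySem.Set String) (c : String) :
    PySem.Set.diff A (T ++ [c]) = PySem.Set.discard (PySem.Set.diff A T) c := by
  simp only [PySem.Set.diff, PySem.Set.discard, List.filter_filter]
  congr 1; funext x
  by_cases h : x = c <;> simp [h]

-- lengths never shrink along the target fold
lemma bStep_len (A0 T : PySem.Set String) (c : String) :
    T.length ≤ (bStep A0 T c).length := by
  unfold bStep PySem.Set.add
  split_ifs <;> simp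

lemma bFold_len (A0 : PySem.Set String) (cs : List String) (T : PySem.Set String) :
    T.length ≤ (cs.foldl (bStep A0) T).length := by
  induction cs generalizing T with
  | nil => simp
  | cons c cs ih => exact le_trans (bStep_len A0 T c) (ih _)

lemma bFoldOuter_len (cf : PySem.Dict String (List String)) (A0 : PySem.Set String)
    (snap : List String) (T : PySem.Set String) :
    T.length ≤ (snap.foldl (fun t m => (PySem.Dict.getD cf m []).foldl (bStep A0) t) T).length := by
  induction snap generalizing T with
  | nil => simp
  | cons m snap ih => exact le_trans (bFold_len A0 _ T) (ih _)

-- A's inner for-loop over one conflict list, started from state (A0 \ T, B0 ∪ T, ch),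
-- is B's target fold
lemma inner_eq (A0 B0 : PySem.Set String) (cs : List String) (T : PySem.Set String) (ch : Bool) :
    cs.foldl aStep (PySem.Set.diff A0 T, PySem.Set.update B0 T, ch)
      = (PySem.Set.diff A0 (cs.foldl (bStep A0) T),
         PySem.Set.update B0 (cs.foldl (bStep A0) T),
         ch || decide (T.length < (cs.foldl (bStep A0) T).length)) := by
  induction cs generalizing T ch with
  | nil => simp
  | cons c cs ih =>
    simp only [List.foldl_cons]
    by_cases hA : c ∈ A0
    · by_cases hT : c ∈ T
      · have h1 : aStep (PySem.Set.diff A0 T, PySem.Set.update B0 T, ch) c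
            = (PySem.Set.diff A0 T, PySem.Set.update B0 T, ch) := by
          simp [aStep, PySem.Set.diff, PySem.Set.contains, hT]
        have h2 : bStep A0 T c = T := by
          simp [bStep, PySem.Set.contains, PySem.Set.add, hA, hT]
        rw [h1]
        simp only [h2]
        exact ih T ch
      · have h1 : aStep (PySem.Set.diff A0 T, PySem.Set.update B0 T, ch) c
            = (PySem.Set.diff A0 (T ++ [c]), PySem.Set.update B0 (T ++ [c]), true) := by
          simp only [aStep]
          rw [if_pos]
          · refine congrArg₂ Prod.mk (diff_snoc A0 T c).symm (congrArg₂ Prod.mk ?_ rfl)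
            simp [PySem.Set.update, List.foldl_append]
          · simp [PySem.Set.diff, PySem.Set.contains, hA, hT]
        have h2 : bStep A0 T c = T ++ [c] := by
          simp [bStep, PySem.Set.contains, PySem.Set.add, hA, hT]
        rw [h1]
        simp only [h2]
        rw [ih]
        have hlen : T.length < (cs.foldl (bStep A0) (T ++ [c])).length :=
          lt_of_lt_of_le (by simp) (bFold_len A0 cs (T ++ [c]))
        simp [hlen]
    · have h1 : aStep (PySem.Set.diff A0 T, PySem.Set.update B0 T, ch) c
          = (PySem.Set.diff A0 T, PySem.Set.update B0 T, ch) := by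
        simp [aStep, PySem.Set.diff, PySem.Set.contains, hA]
      have h2 : bStep A0 T c = T := by
        simp [bStep, PySem.Set.contains, hA]
      rw [h1]
      simp only [h2]
      exact ih T ch

-- one whole pass of A's while loop is B's target fold over the snapshot
lemma pass_eq (cf : PySem.Dict String (List String)) (snap : List String)
    (A0 B0 T : PySem.Set String) (ch : Bool) :
    aPass cf snap (PySem.Set.diff A0 T, PySem.Set.update B0 T, ch)
      = (PySem.Set.diff A0 (snap.foldl (fun t m => (PySem.Dict.getD cf m []).foldl (bStep A0) t) T),
         PySem.Set.update B0 (snap.foldl (fun t m => (PySem.Dict.getD cf m []).foldl (bStep A0) t) T),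
         ch || decide (T.length < (snap.foldl (fun t m => (PySem.Dict.getD cf m []).foldl (bStep A0) t) T).length)) := by
  induction snap generalizing T ch with
  | nil => simp [aPass]
  | cons m snap ih =>
    simp only [aPass, List.foldl_cons] at *
    rw [inner_eq, ih]
    have h1 : T.length ≤ ((PySem.Dict.getD cf m []).foldl (bStep A0) T).length :=
      bFold_len A0 _ T
    have h2 : ((PySem.Dict.getD cf m []).foldl (bStep A0) T).length
        ≤ ((snap.foldl (fun t m => (PySem.Dict.getD cf m []).foldl (bStep A0) t)
            ((PySem.Dict.getD cf m []).foldl (bStep A0) T))).length :=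
      bFoldOuter_len cf A0 snap _
    refine congrArg₂ Prod.mk rfl (congrArg₂ Prod.mk rfl ?_)
    rcases Nat.lt_or_ge T.length ((PySem.Dict.getD cf m []).foldl (bStep A0) T).length with h | h
    · simp [h, Nat.lt_of_lt_of_le h h2]
    · have he : T.length = ((PySem.Dict.getD cf m []).foldl (bStep A0) T).length :=
        le_antisymm h1 h
      simp [he]

-- soundness: everything in the target fold came from T or is an A0-member conflict of a snapshot module
lemma bFold_inner_sound (A0 : PySem.Set String) (cs : List String) (T : PySem.Set String)
    (x : String) (hx : x ∈ cs.foldl (bStep A0) T) :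
    x ∈ T ∨ (x ∈ cs ∧ x ∈ A0) := by
  induction cs generalizing T with
  | nil => simp at hx; exact Or.inl hx
  | cons c cs ih =>
    simp only [List.foldl_cons] at hx
    rcases ih _ hx with h | h
    · by_cases hA : c ∈ A0
      · by_cases hT : c ∈ T
        · rw [show bStep A0 T c = T by
            simp [bStep, PySem.Set.contains, PySem.Set.add, hA, hT]] at h
          exact Or.inl h
        · rw [show bStep A0 T c = T ++ [c] by
            simp [bStep, PySem.Set.contains, PySem.Set.add, hA, hT]] at h
          rcases List.mem_append.mp h with h | h
          · exact Or.inl h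
          · simp at h; subst h
            exact Or.inr ⟨by simp, hA⟩
      · rw [show bStep A0 T c = T by simp [bStep, PySem.Set.contains, hA]] at h
        exact Or.inl h
    · exact Or.inr ⟨by simp [h.1], h.2⟩

lemma bFold_outer_sound (cf : PySem.Dict String (List String)) (A0 : PySem.Set String)
    (snap : List String) (T : PySem.Set String) (x : String)
    (hx : x ∈ snap.foldl (fun t m => (PySem.Dict.getD cf m []).foldl (bStep A0) t) T) :
    x ∈ T ∨ ∃ m ∈ snap, x ∈ PySem.Dict.getD cf m [] ∧ x ∈ A0 := by
  induction snap generalizing T with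
  | nil => simp at hx; exact Or.inl hx
  | cons m snap ih =>
    simp only [List.foldl_cons] at hx
    rcases ih _ hx with h | h
    · rcases bFold_inner_sound A0 _ T x h with h2 | h2
      · exact Or.inl h2
      · exact Or.inr ⟨m, by simp, h2.1, h2.2⟩
    · rcases h with ⟨m', hm', h'⟩
      exact Or.inr ⟨m', by simp [hm'], h'⟩

-- membership is monotone along the target fold
lemma bFold_inner_mono (A0 : PySem.Set String) (cs : List String) (T : PySem.Set String)
    (x : String) (hx : x ∈ T) : x ∈ cs.foldl (bStep A0) T := by
  induction cs generalizing T with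
  | nil => simpa using hx
  | cons c cs ih =>
    simp only [List.foldl_cons]
    apply ih
    unfold bStep PySem.Set.add
    split_ifs <;> simp [hx]

lemma bFold_outer_mono (cf : PySem.Dict String (List String)) (A0 : PySem.Set String)
    (snap : List String) (T : PySem.Set String) (x : String) (hx : x ∈ T) :
    x ∈ snap.foldl (fun t m => (PySem.Dict.getD cf m []).foldl (bStep A0) t) T := by
  induction snap generalizing T with
  | nil => simpa using hx
  | cons m snap ih =>
    simp only [List.foldl_cons]
    exact ih _ (bFold_inner_mono A0 _ T x hx)

-- completeness: an A0-member conflict of a snapshot module lands in the target fold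
lemma bFold_inner_complete (A0 : PySem.Set String) (cs : List String) (T : PySem.Set String)
    (c : String) (hc : c ∈ cs) (hA : c ∈ A0) : c ∈ cs.foldl (bStep A0) T := by
  induction cs generalizing T with
  | nil => simp at hc
  | cons c' cs ih =>
    simp only [List.foldl_cons]
    rcases List.mem_cons.mp hc with h | h
    · subst h
      apply bFold_inner_mono
      simp only [bStep, PySem.Set.contains, PySem.Set.add]
      split_ifs with h1 h2
      · simpa using h2
      · simp
      · simp [hA] at h1
    · exact ih _ h

lemma bFold_outer_complete (cf : PySem.Dict String (List String)) (A0 : PySem.Set String)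
    (snap : List String) (T : PySem.Set String) (m c : String) (hm : m ∈ snap)
    (hc : c ∈ PySem.Dict.getD cf m []) (hA : c ∈ A0) :
    c ∈ snap.foldl (fun t m => (PySem.Dict.getD cf m []).foldl (bStep A0) t) T := by
  induction snap generalizing T with
  | nil => simp at hm
  | cons m' snap ih =>
    simp only [List.foldl_cons]
    rcases List.mem_cons.mp hm with h | h
    · subst h
      exact bFold_outer_mono cf A0 snap _ c (bFold_inner_complete A0 _ T c hc hA)
    · exact ih _ h

-- after the first pass the targets of the shrunken active set are empty
lemma second_targets_nil (cf : PySem.Dict String (List String)) (A0 : PySem.Set String) :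
    bTargets cf (PySem.Set.diff A0 (bTargets cf A0)) = [] := by
  apply List.eq_nil_iff_forall_not_mem.mpr
  intro x hx
  rcases bFold_outer_sound cf _ _ _ x hx with h | ⟨m, hm, hc, hA⟩
  · simp at h
  · have hmA : m ∈ A0 := (List.mem_filter.mp hm).1
    have hx2 := List.mem_filter.mp hA
    have hxA : x ∈ A0 := hx2.1
    have hxT : x ∈ bTargets cf A0 :=
      bFold_outer_complete cf A0 A0 PySem.Set.empty m x hmA hc hxA
    have := hx2.2
    simp [hxT] at this

-- ===== VERDICT (by name: the statement is the Claim_ definition above) =====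
theorem solve_conflicts_py_spec : Claim_equal_solve_conflicts_py := by
  intro enable disable conflicts _
  unfold Spec_solve_conflicts_py
  set cf := PySem.Dict.ofList conflicts with hcf
  set A0 := PySem.Set.ofList enable with hA0
  set B0 := PySem.Set.ofList disable with hB0
  set T1 := bTargets cf A0 with hT1
  have hpass1 : aPass cf A0 (A0, B0, false)
      = (PySem.Set.diff A0 T1, PySem.Set.update B0 T1, decide (0 < T1.length)) := by
    have h := pass_eq cf A0 A0 B0 [] false
    simpa [diff_nil, PySem.Set.update, bTargets, PySem.Set.empty, hT1] using h
  have hloop : aLoop cf (enable.length + 2) A0 B0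
      = (PySem.Set.diff A0 T1, PySem.Set.update B0 T1) := by
    have e1 : aLoop cf (enable.length + 2) A0 B0
        = (if (aPass cf A0 (A0, B0, false)).2.2
           then aLoop cf (enable.length + 1) (aPass cf A0 (A0, B0, false)).1
             (aPass cf A0 (A0, B0, false)).2.1
           else ((aPass cf A0 (A0, B0, false)).1, (aPass cf A0 (A0, B0, false)).2.1)) := rfl
    rw [e1, hpass1]
    by_cases hT : T1 = []
    · simp [hT]
    · have hpos : 0 < T1.length := List.length_pos_iff.mpr hT
      simp only [hpos, decide_true]
      have h2 : bTargets cf (PySem.Set.diff A0 T1) = [] := second_targets_nil cf A0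
      have hpass2 : aPass cf (PySem.Set.diff A0 T1)
          (PySem.Set.diff A0 T1, PySem.Set.update B0 T1, false)
          = (PySem.Set.diff A0 T1, PySem.Set.update B0 T1, false) := by
        have h := pass_eq cf (PySem.Set.diff A0 T1) (PySem.Set.diff A0 T1)
          (PySem.Set.update B0 T1) [] false
        simp only [bTargets, PySem.Set.empty] at h2
        simpa [diff_nil, PySem.Set.update, h2] using h
      have e2 : aLoop cf (enable.length + 1) (PySem.Set.diff A0 T1) (PySem.Set.update B0 T1)
          = (if (aPass cf (PySem.Set.diff A0 T1)
                (PySem.Set.diff A0 T1, PySem.Set.update B0 T1, false)).2.2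
             then aLoop cf enable.length
               (aPass cf (PySem.Set.diff A0 T1)
                 (PySem.Set.diff A0 T1, PySem.Set.update B0 T1, false)).1
               (aPass cf (PySem.Set.diff A0 T1)
                 (PySem.Set.diff A0 T1, PySem.Set.update B0 T1, false)).2.1
             else ((aPass cf (PySem.Set.diff A0 T1)
                 (PySem.Set.diff A0 T1, PySem.Set.update B0 T1, false)).1,
               (aPass cf (PySem.Set.diff A0 T1)
                 (PySem.Set.diff A0 T1, PySem.Set.update B0 T1, false)).2.1)) := rfl
      rw [e2, hpass2]
      simp
  have eA : solve_conflicts_py enable disable conflicts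
      = (PySem.List.sorted (aLoop cf (enable.length + 2) A0 B0).1 (fun x => x) false,
         PySem.List.sorted (aLoop cf (enable.length + 2) A0 B0).2 (fun x => x) false) := rfl
  have eB : solve_conflicts_py_alt enable disable conflicts
      = (PySem.List.sorted (PySem.Set.diff A0 T1) (fun x => x) false,
         PySem.List.sorted (PySem.Set.union B0 T1) (fun x => x) false) := rfl
  rw [eA, eB, hloop]
  simp [PySem.Set.union]
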